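-- pv_equiv track=rewrite | github.com/pypi-data/pypi-mirror-366 | packages/semantic-copycat-miner/semantic_copycat_miner-1.6.1.tar.gz/semantic_copycat_miner-1.6.1/copycatm/hashing/fuzzy_improved.py | _control_flow_pattern_hash
-- ===== SOURCE A (Python) =====
-- def _control_flow_pattern_hash(data: str) -> str:
--     """Hash based on control flow complexity."""
--     lines = data.split('\n')
--
--     # Analyze indentation patterns (proxy for nesting)
--     indents = []
--     for line in lines:
--         if line.strip():
--             indent = len(line) - len(line.lstrip())
--             indents.append(indent)
--
--     if not indents:
--         return "0000"
--
--     # Control flow metrics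
--     max_indent = max(indents)
--     indent_changes = sum(1 for i in range(1, len(indents))
--                        if indents[i] != indents[i-1])
--     unique_levels = len(set(indents))
--     avg_indent = sum(indents) // len(indents)
--
--     # Normalize to hex
--     metrics = [
--         min(max_indent // 4, 15),
--         min(indent_changes // 3, 15),
--         min(unique_levels, 15),
--         min(avg_indent // 2, 15)
--     ]
--
--     return "".join(f"{m:X}" for m in metrics)
-- ===== SOURCE B (Python) =====
-- def _control_flow_pattern_hash(data: str) -> str:
--     """Hash based on control flow complexity (single pass, no indents list)."""
--     count = total = mx = changes = 0
--     prev = None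
--     levels = set()
--     for line in data.split('\n'):
--         if line.strip():
--             ind = len(line) - len(line.lstrip())
--             count += 1
--             total += ind
--             if ind > mx:
--                 mx = ind
--             if prev is not None and ind != prev:
--                 changes += 1
--             prev = ind
--             levels.add(ind)
--     if count == 0:
--         return "0000"
--     avg = total // count
--     return "".join("0123456789ABCDEF"[min(v, 15)]
--                    for v in (mx // 4, changes // 3, len(levels), avg // 2))
-- ===== Notes on version B (the rewrite author's own statement) =====
-- stated objective: alternative
-- what changed: Replaces A's materialized indents list and four separate passes (max, an index-based range scan for changes, set(), sum) by a single streaming pass over the lines maintaining running count/sum/max/previous-indent/change-counter/level-set.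
import Mathlib
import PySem

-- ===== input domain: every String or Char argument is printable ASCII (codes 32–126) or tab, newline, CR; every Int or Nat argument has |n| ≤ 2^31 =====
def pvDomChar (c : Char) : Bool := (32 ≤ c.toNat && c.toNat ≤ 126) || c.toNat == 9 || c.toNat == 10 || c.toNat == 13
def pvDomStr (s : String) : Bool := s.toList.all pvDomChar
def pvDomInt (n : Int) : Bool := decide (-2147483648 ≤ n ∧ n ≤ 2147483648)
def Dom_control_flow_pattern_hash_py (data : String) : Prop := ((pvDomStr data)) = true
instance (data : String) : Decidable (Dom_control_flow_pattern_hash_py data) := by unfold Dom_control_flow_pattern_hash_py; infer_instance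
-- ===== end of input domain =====

-- B replaces A's materialized indents list and its four separate passes by one streaming
-- pass over the lines with running count/sum/max/previous-indent/change-counter/level-set
-- (objective: alternative decomposition, same asymptotic cost).

-- ===== PORT A =====
-- f"{m:X}" : uppercase hex of m; exact for 0 ≤ m ≤ 15, the only values the metrics reach.
def pvHexA (m : Int) : List Char :=
  if m < 10 then PySem.Int.toChars m
  else if m = 10 then ['A'] else if m = 11 then ['B'] else if m = 12 then ['C']
  else if m = 13 then ['D'] else if m = 14 then ['E'] else ['F']

def control_flow_pattern_hash_py (data : String) : String :=
  let lines := PySem.Chars.splitOn data.toList ['\n']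
  let indents : List Int := lines.foldl (fun acc line =>
    if PySem.Chars.strip line ≠ [] then
      acc ++ [PySem.Chars.len line - PySem.Chars.len (PySem.Chars.lstrip line)]
    else acc) []
  if indents = [] then "0000"
  else
    -- max(indents); indents ≠ [] in this branch, so the .getD default is never used
    let max_indent := (PySem.List.max? indents (fun x => x)).getD 0
    let indent_changes := ((PySem.List.pyRange 1 (PySem.List.len indents) 1).map
        (fun i => if PySem.List.pyGetD indents i 0 ≠ PySem.List.pyGetD indents (i - 1) 0
                  then (1 : Int) else 0)).sum
    let unique_levels : Int := PySem.Set.len (PySem.Set.ofList indents)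
    let avg_indent := PySem.Int.floordiv indents.sum (PySem.List.len indents)
    let metrics := [min (PySem.Int.floordiv max_indent 4) 15,
                    min (PySem.Int.floordiv indent_changes 3) 15,
                    min unique_levels 15,
                    min (PySem.Int.floordiv avg_indent 2) 15]
    String.mk (PySem.Chars.join [] (metrics.map pvHexA))

-- ===== PORT B =====
structure PvCF where
  cnt : Int
  total : Int
  mx : Int
  changes : Int
  prev : Option Int
  levels : PySem.Set Int

def pvStep (s : PvCF) (line : List Char) : PvCF :=
  if PySem.Chars.strip line ≠ [] then
    let ind := PySem.Chars.len line - PySem.Chars.len (PySem.Chars.lstrip line)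
    { cnt := s.cnt + 1
      total := s.total + ind
      mx := if ind > s.mx then ind else s.mx
      changes := match s.prev with
        | some p => if ind ≠ p then s.changes + 1 else s.changes
        | none => s.changes
      prev := some ind
      levels := PySem.Set.add s.levels ind }
  else s

def pvHexTable : List Char := "0123456789ABCDEF".toList

def control_flow_pattern_hash_py_alt (data : String) : String :=
  let s := (PySem.Chars.splitOn data.toList ['\n']).foldl pvStep ⟨0, 0, 0, 0, none, PySem.Set.empty⟩
  if s.cnt = 0 then "0000"
  else
    let avg := PySem.Int.floordiv s.total s.cnt
    -- "0123456789ABCDEF"[min(v, 15)]; the index is always in range, the default unreachable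
    String.mk ([PySem.Int.floordiv s.mx 4, PySem.Int.floordiv s.changes 3,
                PySem.Set.len s.levels, PySem.Int.floordiv avg 2].map
               (fun v => PySem.List.pyGetD pvHexTable (min v 15) '0'))

-- ===== PRECONDITION & SPEC =====
def Spec_control_flow_pattern_hash_py (data : String) (out : String) : Prop := out = control_flow_pattern_hash_py_alt data
instance (data : String) (out : String) : Decidable (Spec_control_flow_pattern_hash_py data out) := by unfold Spec_control_flow_pattern_hash_py; infer_instance

-- ===== CLAIM (what is proved, stated in full; the proofs are below) =====
def Claim_equal_control_flow_pattern_hash_py : Prop := ∀ (data : String), Dom_control_flow_pattern_hash_py data → Spec_control_flow_pattern_hash_py data (control_flow_pattern_hash_py data)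

-- ===== LEMMAS AND PROOFS =====

-- proof-only abbreviations
def pvInd (line : List Char) : Int :=
  PySem.Chars.len line - PySem.Chars.len (PySem.Chars.lstrip line)

def pvS (xs : List Int) : Int :=
  ((PySem.List.pyRange 1 (PySem.List.len xs) 1).map
    (fun i => if PySem.List.pyGetD xs i 0 ≠ PySem.List.pyGetD xs (i - 1) 0
              then (1 : Int) else 0)).sum

def pvStepI (s : PvCF) (ind : Int) : PvCF :=
  { cnt := s.cnt + 1
    total := s.total + ind
    mx := if ind > s.mx then ind else s.mx
    changes := match s.prev with
      | some p => if ind ≠ p then s.changes + 1 else s.changes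
      | none => s.changes
    prev := some ind
    levels := PySem.Set.add s.levels ind }

lemma pvInd_nonneg (line : List Char) : 0 ≤ pvInd line := by
  have := List.length_dropWhile_le PySem.Chars.isspace line
  simp [pvInd, PySem.Chars.len, PySem.Chars.lstrip]
  omega

lemma pvS_snoc (xs : List Int) (y : Int) :
    pvS (xs ++ [y]) = pvS xs +
      (match xs.getLast? with
       | none => 0
       | some p => if y ≠ p then (1 : Int) else 0) := by
  rcases xs.eq_nil_or_concat' with rfl | ⟨l, a, rfl⟩
  · simp [pvS, PySem.List.pyRange]
  · set xs := l ++ [a] with hxs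
    have hn : xs.length = l.length + 1 := by simp [hxs]
    have hlen : PySem.List.len (xs ++ [y]) = (xs.length : Int) + 1 := by
      simp [PySem.List.len]
    have hpos : (1 : Int) ≤ (xs.length : Int) := by omega
    have hsplit : PySem.List.pyRange 1 ((xs.length : Int) + 1) =
        PySem.List.pyRange 1 (xs.length : Int) ++ PySem.List.pyRange (xs.length : Int) ((xs.length : Int) + 1) :=
      PySem.List.pyRange_one_append _ _ _ hpos (by omega)
    have hlast : PySem.List.pyRange (xs.length : Int) ((xs.length : Int) + 1) = [(xs.length : Int)] := by
      rw [PySem.List.pyRange_one_cons (by omega)]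
      have h0 : PySem.List.pyRange ((xs.length : Int) + 1) ((xs.length : Int) + 1) = [] := by
        simp [PySem.List.pyRange]
      rw [h0]
    have hcongr : ∀ i ∈ PySem.List.pyRange (1 : Int) (xs.length : Int),
        (if PySem.List.pyGetD (xs ++ [y]) i 0 ≠ PySem.List.pyGetD (xs ++ [y]) (i - 1) 0 then (1:Int) else 0)
        = (if PySem.List.pyGetD xs i 0 ≠ PySem.List.pyGetD xs (i - 1) 0 then (1:Int) else 0) := by
      intro i hi
      rw [PySem.List.mem_pyRange_one] at hi
      have h1 : PySem.List.pyGetD (xs ++ [y]) i 0 = PySem.List.pyGetD xs i 0 := by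
        rw [PySem.List.pyGetD_eq_getElem _ _ (by omega) (by simp; try omega),
            PySem.List.pyGetD_eq_getElem _ _ (by omega) (by omega)]
        exact List.getElem_append_left (by omega)
      have h2 : PySem.List.pyGetD (xs ++ [y]) (i - 1) 0 = PySem.List.pyGetD xs (i - 1) 0 := by
        rw [PySem.List.pyGetD_eq_getElem _ _ (by omega) (by simp; try omega),
            PySem.List.pyGetD_eq_getElem _ _ (by omega) (by omega)]
        exact List.getElem_append_left (by omega)
      rw [h1, h2]
    have hgetn : PySem.List.pyGetD (xs ++ [y]) (xs.length : Int) 0 = y := by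
      rw [PySem.List.pyGetD_eq_getElem _ _ (by omega) (by simp)]
      simp
    have hgetn1 : PySem.List.pyGetD (xs ++ [y]) ((xs.length : Int) - 1) 0 = a := by
      have hidx : ((xs.length : Int) - 1) = ((l.length : Nat) : Int) := by
        rw [hn]; push_cast; ring
      rw [hidx, PySem.List.pyGetD_natCast, hxs, List.append_assoc]
      simp
    have hlastx : xs.getLast? = some a := List.getLast?_concat
    unfold pvS
    rw [hlen, hsplit, hlast, List.map_append, List.sum_append,
        List.map_congr_left hcongr, hlastx]
    simp only [List.map_cons, List.map_nil, List.sum_cons, List.sum_nil]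
    rw [hgetn, hgetn1]
    have hx : PySem.List.len xs = (xs.length : Int) := rfl
    rw [hx]
    split_ifs <;> ring

lemma pvFold_spec (xs : List Int) :
    xs.foldl pvStepI ⟨0, 0, 0, 0, none, PySem.Set.empty⟩ =
      ⟨xs.length, xs.sum, xs.foldl max 0, pvS xs, xs.getLast?, PySem.Set.ofList xs⟩ := by
  induction xs using List.reverseRecOn with
  | nil =>
    have h : pvS [] = 0 := by decide
    simp [h, PySem.Set.ofList, PySem.Set.empty]
  | append_singleton xs y ih =>
    rw [List.foldl_append, ih]
    simp only [List.foldl_cons, List.foldl_nil]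
    unfold pvStepI
    refine PvCF.mk.injEq .. ▸ ?_
    constructor
    · push_cast; simp
    constructor
    · simp
    constructor
    · rw [List.foldl_append]; simp only [List.foldl_cons, List.foldl_nil]
      rcases le_or_gt y (xs.foldl max 0) with h | h
      · simp [not_lt.mpr h, max_eq_left h]
      · simp [h, max_eq_right (le_of_lt h)]
    constructor
    · rw [pvS_snoc]
      cases h : xs.getLast? with
      | none => simp
      | some p => simp only []; split_ifs <;> ring
    constructor
    · simp
    · show PySem.Set.add (PySem.Set.ofList xs) y = PySem.Set.ofList (xs ++ [y])
      rw [PySem.Set.ofList_eq_foldl (xs ++ [y]), List.foldl_append, ← PySem.Set.ofList_eq_foldl]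
      simp

lemma pvHex_eq (m : Int) (h0 : 0 ≤ m) (h15 : m ≤ 15) :
    pvHexA m = [PySem.List.pyGetD pvHexTable m '0'] := by
  interval_cases m <;> decide

def pvA (indents : List Int) : String :=
  if indents = [] then "0000"
  else
    let max_indent := (PySem.List.max? indents (fun x => x)).getD 0
    let unique_levels : Int := PySem.Set.len (PySem.Set.ofList indents)
    let avg_indent := PySem.Int.floordiv indents.sum (PySem.List.len indents)
    let metrics := [min (PySem.Int.floordiv max_indent 4) 15,
                    min (PySem.Int.floordiv (pvS indents) 3) 15,
                    min unique_levels 15,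
                    min (PySem.Int.floordiv avg_indent 2) 15]
    String.mk (PySem.Chars.join [] (metrics.map pvHexA))

def pvB (s : PvCF) : String :=
  if s.cnt = 0 then "0000"
  else
    String.mk ([PySem.Int.floordiv s.mx 4, PySem.Int.floordiv s.changes 3,
                PySem.Set.len s.levels, PySem.Int.floordiv (PySem.Int.floordiv s.total s.cnt) 2].map
               (fun v => PySem.List.pyGetD pvHexTable (min v 15) '0'))

lemma pvDiv_nonneg (a b : Int) (ha : 0 ≤ a) (hb : 0 < b) : 0 ≤ PySem.Int.floordiv a b := by
  rw [PySem.Int.floordiv_eq_ediv_of_pos hb]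
  exact Int.ediv_nonneg ha (le_of_lt hb)

lemma pvS_nonneg (xs : List Int) : 0 ≤ pvS xs := by
  apply List.sum_nonneg
  intro x hx
  obtain ⟨i, _, rfl⟩ := List.mem_map.1 hx
  split_ifs <;> norm_num

lemma pvFinal (h : Int) (t : List Int) (hnn : ∀ x ∈ h :: t, 0 ≤ x) :
    pvA (h :: t) =
      pvB ⟨(h :: t).length, (h :: t).sum, (h :: t).foldl max 0, pvS (h :: t),
           (h :: t).getLast?, PySem.Set.ofList (h :: t)⟩ := by
  have h0 : (0:Int) ≤ h := hnn h (List.mem_cons_self)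
  have hmax0 : (h :: t).foldl max 0 = t.foldl max h := by
    simp only [List.foldl_cons, max_eq_right h0]
  have hmaxnn : 0 ≤ t.foldl max h := le_trans h0 (PySem.List.le_foldl_max t h).1
  have hsumnn : 0 ≤ (h :: t).sum := List.sum_nonneg hnn
  have hcntpos : (0:Int) < ((h :: t).length : Int) := by exact_mod_cast t.length.succ_pos
  unfold pvA pvB
  simp only [if_neg, PySem.List.max?_id_cons, Option.getD_some, hmax0,
    List.map_cons, List.map_nil, reduceCtorEq, not_false_iff]
  have hlen : PySem.List.len (h :: t) = ((h :: t).length : Int) := rfl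
  rw [hlen]
  have e1 := pvHex_eq (min (PySem.Int.floordiv (t.foldl max h) 4) 15)
    (le_min (pvDiv_nonneg _ _ hmaxnn (by norm_num)) (by norm_num)) (min_le_right _ _)
  have e2 := pvHex_eq (min (PySem.Int.floordiv (pvS (h :: t)) 3) 15)
    (le_min (pvDiv_nonneg _ _ (pvS_nonneg _) (by norm_num)) (by norm_num)) (min_le_right _ _)
  have e3 := pvHex_eq (min (PySem.Set.len (PySem.Set.ofList (h :: t))) 15)
    (le_min (by simp [PySem.Set.len]) (by norm_num)) (min_le_right _ _)
  have e4 := pvHex_eq (min (PySem.Int.floordiv (PySem.Int.floordiv ((h :: t).sum) ((h :: t).length : Int)) 2) 15)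
    (le_min (pvDiv_nonneg _ _ (pvDiv_nonneg _ _ hsumnn hcntpos) (by norm_num)) (by norm_num)) (min_le_right _ _)
  rw [e1, e2, e3, e4]
  congr 1

lemma pvMain (L : List (List Char)) :
    pvA (L.foldl (fun acc line =>
        if PySem.Chars.strip line ≠ [] then acc ++ [pvInd line] else acc) []) =
      pvB (L.foldl pvStep ⟨0, 0, 0, 0, none, PySem.Set.empty⟩) := by
  rw [PySem.List.foldl_append_ite (p := fun line => PySem.Chars.strip line ≠ []) (f := pvInd),
      List.nil_append]
  have hstep : pvStep = fun (s : PvCF) (line : List Char) =>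
      if PySem.Chars.strip line ≠ [] then pvStepI s (pvInd line) else s := by
    funext s line; rfl
  rw [hstep, PySem.List.foldl_ite_eq_foldl_filter (p := fun line => PySem.Chars.strip line ≠ [])
      (f := fun s line => pvStepI s (pvInd line)), ← List.foldl_map, pvFold_spec]
  cases his : (L.filter (fun l => decide (PySem.Chars.strip l ≠ []))).map pvInd with
  | nil => rfl
  | cons h t =>
    apply pvFinal
    intro x hx
    have : x ∈ (L.filter (fun l => decide (PySem.Chars.strip l ≠ []))).map pvInd := his ▸ hx
    obtain ⟨l, _, rfl⟩ := List.mem_map.1 this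
    exact pvInd_nonneg l

-- ===== VERDICT (by name: the statement is the Claim_ definition above) =====
theorem control_flow_pattern_hash_py_spec : Claim_equal_control_flow_pattern_hash_py := by
  intro data _
  show control_flow_pattern_hash_py data = control_flow_pattern_hash_py_alt data
  exact pvMain (PySem.Chars.splitOn data.toList ['\n'])
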